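-- pv_equiv track=rewrite | github.com/eenblam/pnbot | mapgen/mapgen.py | map_parse
-- ===== SOURCE A (Python) =====
-- def map_parse(split_string):
--     try:
--         output = [int(x) for x in split_string]
--     except:
--         output = []
--     if len(output) > 2:
--         output = output[:2]
--     elif len(output) == 1:
--         output.append(500)
--     elif len(output) == 0:
--         output = [500, 500]
--     return output
-- ===== SOURCE B (Python) =====
-- def map_parse(split_string):
--     # Single left-to-right pass keeping only two scalar slots; aborts to the
--     # defaults on the first unparsable element (A builds the whole list first,
--     # then fixes its length with a branch cascade).
--     first, second = 500, 500
--     seen = 0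
--     for x in split_string:
--         try:
--             v = int(x)
--         except:
--             return [500, 500]
--         if seen == 0:
--             first = v
--         elif seen == 1:
--             second = v
--         seen += 1
--     return [first, second]
-- ===== Notes on version B (the rewrite author's own statement) =====
-- stated objective: alternative
-- what changed: Replaces A's build-the-whole-list-then-fix-its-length approach (list comprehension inside try, then a three-branch length cascade) with a single left-to-right pass that keeps only two scalar slots, returning the defaults immediately on the first unparsable element, so no intermediate list and no post-processing exist.
import Mathlib
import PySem

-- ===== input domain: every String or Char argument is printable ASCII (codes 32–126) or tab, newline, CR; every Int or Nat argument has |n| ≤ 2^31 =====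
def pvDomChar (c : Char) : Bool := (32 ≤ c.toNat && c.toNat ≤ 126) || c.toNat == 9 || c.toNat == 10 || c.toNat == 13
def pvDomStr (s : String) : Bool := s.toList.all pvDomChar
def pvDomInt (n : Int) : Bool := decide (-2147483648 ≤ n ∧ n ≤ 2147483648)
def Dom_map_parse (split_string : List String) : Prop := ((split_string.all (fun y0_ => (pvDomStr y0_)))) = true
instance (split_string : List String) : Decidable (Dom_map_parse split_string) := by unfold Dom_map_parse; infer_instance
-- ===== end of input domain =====

-- B replaces A's parse-all-then-fix-length shape by one pass over the list holding two
-- scalar slots, aborting to the defaults on the first unparsable element (objective: alternative).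

-- ===== PORT A =====
-- the try-block: [int(x) for x in split_string], [] if any int(x) raises
def pyTryParse (l : List String) : List Int :=
  match l.mapM PySem.Int.ofStr? with
  | some o => o
  | none => []

def map_parse (split_string : List String) : List Int :=
  let output := pyTryParse split_string
  if output.length > 2 then output.take 2
  else if output.length = 1 then output ++ [500]
  else if output.length = 0 then [500, 500]
  else output

-- ===== PORT B =====
-- the loop of Source B: state (first, second, seen); early return [500,500] on parse failure
def mapParseAltGo : List String → Int → Int → Nat → List Int
  | [], first, second, _ => [first, second]
  | x :: t, first, second, seen =>
    match PySem.Int.ofStr? x with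
    | none => [500, 500]
    | some v =>
      if seen = 0 then mapParseAltGo t v second (seen + 1)
      else if seen = 1 then mapParseAltGo t first v (seen + 1)
      else mapParseAltGo t first second (seen + 1)

def map_parse_alt (split_string : List String) : List Int :=
  mapParseAltGo split_string 500 500 0

-- ===== PRECONDITION & SPEC =====
def Spec_map_parse (split_string : List String) (out : List Int) : Prop := out = map_parse_alt split_string
instance (split_string : List String) (out : List Int) : Decidable (Spec_map_parse split_string out) := by unfold Spec_map_parse; infer_instance

-- ===== CLAIM (what is proved, stated in full; the proofs are below) =====
def Claim_equal_map_parse : Prop := ∀ (split_string : List String), Dom_map_parse split_string → Spec_map_parse split_string (map_parse split_string)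

-- ===== LEMMAS AND PROOFS =====
-- invariant of B's loop, expressed against the parse of the remaining list
theorem mapParseAltGo_spec (l : List String) : ∀ (a b : Int) (seen : Nat),
    (seen = 0 → a = 500 ∧ b = 500) → (seen = 1 → b = 500) →
    mapParseAltGo l a b seen =
      match l.mapM PySem.Int.ofStr? with
      | none => [500, 500]
      | some o =>
        if seen = 0 then (o ++ [500, 500]).take 2
        else if seen = 1 then (a :: (o ++ [500, 500])).take 2
        else [a, b] := by
  induction l with
  | nil =>
    intro a b seen h0 h1
    rcases seen with _ | _ | seen
    · simp [mapParseAltGo, (h0 rfl).1, (h0 rfl).2, List.mapM_nil]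
    · simp [mapParseAltGo, h1 rfl, List.mapM_nil]
    · simp [mapParseAltGo, List.mapM_nil]
  | cons x t ih =>
    intro a b seen h0 h1
    cases hx : PySem.Int.ofStr? x with
    | none => simp [mapParseAltGo, hx, List.mapM_cons]
    | some v =>
      rcases seen with _ | _ | seen
      · have := ih v b 1 (by simp) (by simp [(h0 rfl).2])
        simp [mapParseAltGo, hx, List.mapM_cons, this]
        cases t.mapM PySem.Int.ofStr? <;> simp
      · have := ih a v 2 (by simp) (by simp)
        simp [mapParseAltGo, hx, List.mapM_cons, this]
        cases t.mapM PySem.Int.ofStr? <;> simp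
      · have := ih a b (seen + 3) (by simp) (by simp)
        simp [mapParseAltGo, hx, List.mapM_cons, this]
        cases t.mapM PySem.Int.ofStr? <;> simp

-- A's cascade equals pad-then-take-2
theorem cascade_eq_pad (o : List Int) :
    (if o.length > 2 then o.take 2
     else if o.length = 1 then o ++ [500]
     else if o.length = 0 then [500, 500]
     else o) = (o ++ [500, 500]).take 2 := by
  match o with
  | [] => simp
  | [a] => simp
  | [a, b] => simp
  | a :: b :: c :: t => simp [List.take]

-- ===== VERDICT (by name: the statement is the Claim_ definition above) =====
theorem map_parse_spec : Claim_equal_map_parse := by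
  intro l _
  unfold Spec_map_parse map_parse map_parse_alt
  rw [mapParseAltGo_spec l 500 500 0 (by simp) (by simp)]
  unfold pyTryParse
  cases l.mapM PySem.Int.ofStr? with
  | none => simp
  | some o => simpa using cascade_eq_pad o
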